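-- pv_equiv track=rewrite | github.com/Wonji1/coding-test | etc/candy_war.py | teacher
-- ===== SOURCE A (Python) =====
-- def teacher(N,candy):
--     tmp_list = [0 for i in range(N)]
--
--     for idx in range(N):
--         if candy[idx] %2 == 1:
--             candy[idx] += 1
--         candy[idx] = candy[idx] // 2
--         tmp_list[(idx+1)% N] = candy[idx]
--
--     for idx in range(N):
--         candy[idx] += tmp_list[idx]
--
--     return candy
-- ===== SOURCE B (Python) =====
-- def teacher(N, candy):
--     if N <= 0:
--         return candy
--     prev = (candy[N - 1] + 1) // 2
--     for i in range(N):
--         cur = (candy[i] + 1) // 2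
--         candy[i] = cur + prev
--         prev = cur
--     return candy
-- ===== Notes on version B (the rewrite author's own statement) =====
-- stated objective: simpler
-- what changed: Replaced A's two passes with a temporary list (halve each entry, stash it at the next index mod N, then add the stash) by a single in-place pass with a rolling accumulator prev holding the previous student's halved count (seeded from the wrap-around last student), using (c+1)//2 for the round-up halving; one pass and no temporary list gives a constant-factor speedup.
import Mathlib
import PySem

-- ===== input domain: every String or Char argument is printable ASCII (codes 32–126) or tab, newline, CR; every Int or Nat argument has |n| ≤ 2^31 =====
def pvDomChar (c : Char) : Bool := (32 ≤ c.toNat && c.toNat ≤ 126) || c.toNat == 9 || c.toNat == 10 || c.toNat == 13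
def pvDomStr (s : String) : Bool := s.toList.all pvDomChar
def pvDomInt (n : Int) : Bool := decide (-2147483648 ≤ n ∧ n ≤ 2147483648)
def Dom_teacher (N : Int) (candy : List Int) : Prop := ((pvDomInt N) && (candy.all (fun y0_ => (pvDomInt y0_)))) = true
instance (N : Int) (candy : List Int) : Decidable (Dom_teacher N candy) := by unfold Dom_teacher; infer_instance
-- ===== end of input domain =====

-- B replaces A's two passes with a temporary list by one in-place pass with a rolling
-- accumulator (objective: simpler). Both A and B mutate `candy` in place in Python and
-- leave it in the same final state; the theorems are about the return value.

-- ===== PORT A =====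
def teacherStep1 (N : Int) (st : List Int × List Int) (idx : Int) : List Int × List Int :=
  let c0 := PySem.List.pyGetD st.1 idx 0
  let c1 := if PySem.Int.mod c0 2 = 1 then c0 + 1 else c0
  let c2 := PySem.Int.floordiv c1 2
  (st.1.set idx.toNat c2, st.2.set (PySem.Int.mod (idx + 1) N).toNat c2)

def teacherStep2 (tmp : List Int) (cs : List Int) (idx : Int) : List Int :=
  cs.set idx.toNat (PySem.List.pyGetD cs idx 0 + PySem.List.pyGetD tmp idx 0)

def teacher (N : Int) (candy : List Int) : List Int :=
  let tmp_list : List Int := (PySem.List.pyRange 0 N 1).map (fun _ => 0)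
  let st := (PySem.List.pyRange 0 N 1).foldl (teacherStep1 N) (candy, tmp_list)
  (PySem.List.pyRange 0 N 1).foldl (teacherStep2 st.2) st.1

-- ===== PORT B =====
def teacherAltStep (st : List Int × Int) (i : Int) : List Int × Int :=
  let cur := PySem.Int.floordiv (PySem.List.pyGetD st.1 i 0 + 1) 2
  (st.1.set i.toNat (cur + st.2), cur)

def teacher_alt (N : Int) (candy : List Int) : List Int :=
  if N ≤ 0 then candy
  else
    let prev0 := PySem.Int.floordiv (PySem.List.pyGetD candy (N - 1) 0 + 1) 2
    ((PySem.List.pyRange 0 N 1).foldl teacherAltStep (candy, prev0)).1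

-- ===== PRECONDITION & SPEC =====
-- Pre_ excludes exactly the inputs where A raises IndexError: N larger than len(candy).
def Pre_teacher (N : Int) (candy : List Int) : Prop := N ≤ (candy.length : Int)
instance (N : Int) (candy : List Int) : Decidable (Pre_teacher N candy) := by unfold Pre_teacher; infer_instance

def pvWitness_teacher : Int × List Int := (3, [1, 2, 3])

def Spec_teacher (N : Int) (candy : List Int) (out : List Int) : Prop := out = teacher_alt N candy
instance (N : Int) (candy : List Int) (out : List Int) : Decidable (Spec_teacher N candy out) := by unfold Spec_teacher; infer_instance

-- ===== CLAIM (what is proved, stated in full; the proofs are below) =====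
def Claim_equal_teacher : Prop := ∀ (N : Int) (candy : List Int), Dom_teacher N candy → Pre_teacher N candy → Spec_teacher N candy (teacher N candy)


-- ===== LEMMAS AND PROOFS =====

-- half with round-up on odd, as both programs compute it
def hh (c : Int) : Int := PySem.Int.floordiv (c + 1) 2

lemma hA_eq (c : Int) :
    PySem.Int.floordiv (if PySem.Int.mod c 2 = 1 then c + 1 else c) 2 = hh c := by
  unfold hh
  have h2 : ∀ a : Int, PySem.Int.floordiv a 2 = a / 2 := fun a =>
    PySem.Int.floordiv_eq_ediv_of_pos (by norm_num)
  rw [PySem.Int.mod_eq_emod_of_pos (by norm_num : (0:Int) < 2), h2, h2]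
  split_ifs with hc
  · rfl
  · omega

lemma aux_getD_append (l₁ l₂ : List Int) (k : Nat) (h : l₁.length = k) :
    (l₁ ++ l₂).getD k 0 = l₂.getD 0 0 := by
  subst h; simp [List.getD, List.getElem?_append_right]

lemma aux_set_append (l₁ l₂ : List Int) (k : Nat) (v : Int) (h : l₁.length = k) :
    (l₁ ++ l₂).set k v = l₁ ++ l₂.set 0 v := by
  subst h; rw [List.set_append]; simp

lemma aux_drop_cons (l : List Int) (k : Nat) (h : k < l.length) :
    l.drop k = l.getD k 0 :: l.drop (k + 1) := by
  rw [List.getD_eq_getElem l 0 h]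
  exact (List.getElem_cons_drop h).symm

lemma aux_take_succ (l : List Int) (k : Nat) (h : k < l.length) :
    l.take (k + 1) = l.take k ++ [l.getD k 0] := by
  rw [List.getD_eq_getElem l 0 h, List.take_succ, List.getElem?_eq_getElem h]
  rfl

lemma aux_getD_map_take (l : List Int) (f : Int → Int) (t j : Nat)
    (hj : j < t) (hl : j < l.length) :
    ((l.take t).map f).getD j 0 = f (l.getD j 0) := by
  have h1 : j < ((l.take t).map f).length := by simp; omega
  rw [List.getD_eq_getElem _ 0 h1, List.getD_eq_getElem l 0 hl]
  simp

-- tmp_list's contents after the first k iterations of A's first loop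
def tmpPart (candy : List Int) (m k : Nat) : List Int :=
  (if k = m then hh (candy.getD (m - 1) 0) else 0) ::
    ((candy.take (min k (m - 1))).map hh ++ List.replicate (m - 1 - k) 0)

lemma len_take_map (l : List Int) (f : Int → Int) (k : Nat) (h : k ≤ l.length) :
    ((l.take k).map f).length = k := by simp; omega

lemma A_loop1 (candy : List Int) (m : Nat) (hm : 0 < m) (hlen : m ≤ candy.length)
    (k : Nat) (hk : k ≤ m) :
    (PySem.List.pyRange 0 (k : Int) 1).foldl (teacherStep1 (m : Int))
      (candy, tmpPart candy m 0) =
    ((candy.take k).map hh ++ candy.drop k, tmpPart candy m k) := by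
  induction k with
  | zero => simp [PySem.List.pyRange_one_eq_nil (le_refl (0:Int))]
  | succ k ih =>
    have hk' : k ≤ m := by omega
    have hkl : k < candy.length := by omega
    have hcast : ((k + 1 : Nat) : Int) = (k : Int) + 1 := by push_cast; ring
    rw [hcast, PySem.List.pyRange_one_succ_right (by positivity), List.foldl_append,
        ih hk']
    simp only [List.foldl_cons, List.foldl_nil]
    unfold teacherStep1
    simp only [PySem.List.pyGetD_natCast, Int.toNat_natCast]
    rw [aux_getD_append _ _ k (len_take_map _ _ _ (by omega)),
        aux_drop_cons candy k hkl]
    simp only [List.getD_cons_zero]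
    rw [hA_eq]
    rw [aux_set_append _ _ k _ (len_take_map _ _ _ (by omega))]
    simp only [List.set_cons_zero]
    have hcands : (candy.take k).map hh ++ hh (candy.getD k 0) :: candy.drop (k + 1)
        = (candy.take (k + 1)).map hh ++ candy.drop (k + 1) := by
      rw [aux_take_succ candy k hkl]; simp
    have hmod : PySem.Int.mod ((k : Int) + 1) (m : Int)
        = (((k + 1) % m : Nat) : Int) := by
      have : ((k : Int) + 1) = ((k + 1 : Nat) : Int) := by push_cast; ring
      rw [this]
      exact_mod_cast PySem.Int.mod_natCast (k + 1) m
    rw [hmod]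
    simp only [Int.toNat_natCast]
    refine Prod.ext ?_ ?_
    · simpa using hcands
    · -- the tmp_list component
      show (tmpPart candy m k).set ((k + 1) % m) (hh (candy.getD k 0)) = tmpPart candy m (k + 1)
      unfold tmpPart
      by_cases he : k + 1 = m
      · have hp : (k + 1) % m = 0 := by rw [he]; exact Nat.mod_self m
        have h1 : k = m - 1 := by omega
        rw [hp, List.set_cons_zero, if_pos he,
            show min (k + 1) (m - 1) = min k (m - 1) from by omega,
            show m - 1 - (k + 1) = m - 1 - k from by omega,
            show candy.getD (m - 1) 0 = candy.getD k 0 from by rw [h1]]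
      · have hlt : k + 1 < m := by omega
        have : (k + 1) % m = k + 1 := Nat.mod_eq_of_lt hlt
        rw [this]
        rw [List.set_cons_succ]
        congr 1
        · simp [show ¬ (k = m) from by omega, he]
        · have hmin : min k (m - 1) = k := by omega
          have hmin' : min (k + 1) (m - 1) = k + 1 := by omega
          rw [hmin, hmin']
          rw [aux_set_append _ _ k _ (len_take_map _ _ _ (by omega))]
          have hrep : List.replicate (m - 1 - k) (0 : Int)
              = 0 :: List.replicate (m - 1 - (k + 1)) 0 := by
            rw [show m - 1 - k = (m - 1 - (k + 1)) + 1 from by omega]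
            rfl
          rw [hrep]
          simp only [List.set_cons_zero]
          rw [aux_take_succ candy k hkl]
          simp

lemma A_loop2 (cs tmp : List Int) (m : Nat) (hm : m ≤ cs.length) (hm2 : m ≤ tmp.length)
    (k : Nat) (hk : k ≤ m) :
    (PySem.List.pyRange 0 (k : Int) 1).foldl (teacherStep2 tmp) cs =
      (List.zipWith (· + ·) (cs.take k) (tmp.take k)) ++ cs.drop k := by
  induction k with
  | zero => simp [PySem.List.pyRange_one_eq_nil (le_refl (0:Int))]
  | succ k ih =>
    have hk' : k ≤ m := by omega
    have hkc : k < cs.length := by omega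
    have hkt : k < tmp.length := by omega
    have hlz : (List.zipWith (· + ·) (cs.take k) (tmp.take k)).length = k := by
      simp; omega
    have hcast : ((k + 1 : Nat) : Int) = (k : Int) + 1 := by push_cast; ring
    rw [hcast, PySem.List.pyRange_one_succ_right (by positivity), List.foldl_append,
        ih hk']
    simp only [List.foldl_cons, List.foldl_nil]
    unfold teacherStep2
    simp only [PySem.List.pyGetD_natCast, Int.toNat_natCast]
    rw [aux_getD_append _ _ k hlz, aux_drop_cons cs k hkc]
    simp only [List.getD_cons_zero]
    rw [aux_set_append _ _ k _ hlz]
    simp only [List.set_cons_zero]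
    rw [aux_take_succ cs k hkc, aux_take_succ tmp k hkt,
        List.zipWith_append (by simp; omega)]
    simp

lemma tmpPart_len (candy : List Int) (m : Nat) (hm : 0 < m) (hlen : m ≤ candy.length)
    (k : Nat) (hk : k ≤ m) : (tmpPart candy m k).length = m := by
  unfold tmpPart
  simp
  omega

lemma tmpPart_getD (candy : List Int) (m : Nat) (hm : 0 < m) (hlen : m ≤ candy.length)
    (k : Nat) (hk : k < m) :
    (tmpPart candy m m).getD k 0
      = if k = 0 then hh (candy.getD (m - 1) 0) else hh (candy.getD (k - 1) 0) := by
  unfold tmpPart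
  rcases k with _ | j
  · simp
  · simp only [List.getD_cons_succ]
    rw [if_neg (by omega)]
    rw [show min m (m - 1) = m - 1 from by omega]
    rw [show List.replicate (m - 1 - m) (0:Int) = [] from by rw [show m - 1 - m = 0 from by omega]; rfl]
    rw [List.append_nil]
    rw [aux_getD_map_take candy hh (m - 1) j (by omega) (by omega)]
    norm_num

lemma B_loop (candy : List Int) (m : Nat) (hm : 0 < m) (hlen : m ≤ candy.length)
    (k : Nat) (hk : k ≤ m) :
    (PySem.List.pyRange 0 (k : Int) 1).foldl teacherAltStep
      (candy, hh (candy.getD (m - 1) 0)) =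
    (List.zipWith (· + ·) ((candy.take k).map hh) ((tmpPart candy m m).take k) ++ candy.drop k,
     if k = 0 then hh (candy.getD (m - 1) 0) else hh (candy.getD (k - 1) 0)) := by
  induction k with
  | zero => simp [PySem.List.pyRange_one_eq_nil (le_refl (0:Int))]
  | succ k ih =>
    have hk' : k ≤ m := by omega
    have hkl : k < candy.length := by omega
    have hkt : k < (tmpPart candy m m).length := by
      rw [tmpPart_len candy m hm hlen m (le_refl m)]; omega
    have hlz : (List.zipWith (· + ·) ((candy.take k).map hh)
        ((tmpPart candy m m).take k)).length = k := by
      simp [tmpPart_len candy m hm hlen m (le_refl m)]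
      omega
    have hcast : ((k + 1 : Nat) : Int) = (k : Int) + 1 := by push_cast; ring
    rw [hcast, PySem.List.pyRange_one_succ_right (by positivity), List.foldl_append,
        ih hk']
    simp only [List.foldl_cons, List.foldl_nil]
    unfold teacherAltStep
    simp only [PySem.List.pyGetD_natCast, Int.toNat_natCast]
    rw [aux_getD_append _ _ k hlz, aux_drop_cons candy k hkl]
    simp only [List.getD_cons_zero]
    rw [aux_set_append _ _ k _ hlz]
    simp only [List.set_cons_zero]
    refine Prod.ext ?_ ?_
    · show List.zipWith _ _ _ ++ (hh (candy.getD k 0) + _) :: candy.drop (k + 1)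
        = List.zipWith _ _ _ ++ candy.drop (k + 1)
      rw [aux_take_succ candy k hkl, aux_take_succ (tmpPart candy m m) k hkt,
          List.map_append, List.zipWith_append (by simp; omega)]
      simp only [List.map_cons, List.map_nil, List.zipWith_cons_cons, List.zipWith_nil_right]
      rw [tmpPart_getD candy m hm hlen k (by omega)]
      simp
    · show hh (candy.getD k 0) = _
      rw [if_neg (by omega)]
      simp

lemma tmp0_eq (candy : List Int) (m : Nat) (hm : 0 < m) :
    (PySem.List.pyRange 0 (m : Int) 1).map (fun _ => (0 : Int)) = tmpPart candy m 0 := by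
  unfold tmpPart
  rw [if_neg (by omega)]
  simp only [Nat.zero_min, List.take_zero, List.map_nil, List.nil_append, Nat.sub_zero]
  rw [PySem.List.pyRange_one, List.map_map]
  have h1 : ((m : Int) - 0).toNat = m := by omega
  rw [h1]
  simp only [Function.comp_def, List.map_const', List.length_range]
  rw [show m = (m - 1) + 1 from by omega, List.replicate_succ]
  norm_num

-- ===== VERDICT (by name: the statement is the Claim_ definition above) =====
theorem teacher_spec : Claim_equal_teacher := by
  intro N candy _ hpre
  unfold Spec_teacher teacher teacher_alt
  by_cases hN : N ≤ 0
  · simp [hN, PySem.List.pyRange_one_eq_nil hN]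
  · rw [if_neg hN]
    set m : Nat := N.toNat with hmdef
    have hmN : (m : Int) = N := Int.toNat_of_nonneg (by omega)
    have hm : 0 < m := by omega
    have hlen : m ≤ candy.length := by
      unfold Pre_teacher at hpre; omega
    rw [← hmN]
    simp only []
    rw [tmp0_eq candy m hm]
    rw [A_loop1 candy m hm hlen m (le_refl m)]
    have hcs_len : ((candy.take m).map hh ++ candy.drop m).length = candy.length := by
      simp; omega
    have htmp_len : (tmpPart candy m m).length = m :=
      tmpPart_len candy m hm hlen m (le_refl m)
    rw [A_loop2 _ _ m (by simp; omega) (by simp; omega) m (le_refl m)]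
    -- B side
    have hprev : PySem.Int.floordiv (PySem.List.pyGetD candy ((m : Int) - 1) 0 + 1) 2
        = hh (candy.getD (m - 1) 0) := by
      rw [show (m : Int) - 1 = ((m - 1 : Nat) : Int) from by omega]
      rw [PySem.List.pyGetD_natCast]
      rfl
    rw [hprev, B_loop candy m hm hlen m (le_refl m)]
    -- the two expressions coincide
    have hlm := len_take_map candy hh m hlen
    have h1 : ((candy.take m).map hh ++ candy.drop m).take m = (candy.take m).map hh := by
      rw [List.take_append_of_le_length hlm.ge, List.take_of_length_le hlm.le]
    have h2 : ((candy.take m).map hh ++ candy.drop m).drop m = candy.drop m := by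
      rw [List.drop_append_of_le_length hlm.ge, List.drop_of_length_le hlm.le]
      simp
    rw [h1, h2]
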